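-- pv_equiv track=rewrite | github.com/Beomsudev/system_optmizaion_team_project_CS | CS/2_CS_minus.py | evaluate_schedule_with_cost
-- ===== SOURCE A (Python) =====
-- def evaluate_schedule_with_cost(schedule, period=7, fixed_schedule=None):
--     f1, f2, f3 = 0, 0, 0
--     total_days = period
--     if fixed_schedule is not None:
--         # 고정된 스케줄과 현재 스케줄을 결합하여 평가할 전체 스케줄을 생성
--         schedule = [fixed + nurse for fixed, nurse in zip(fixed_schedule, schedule)]
--         total_days += len(fixed_schedule[0])
--
--     # 제약 조건 1: 하루 근무 인원 조건 (모닝, 애프터눈, 나이트 근무 인원 범위 체크)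
--     for day in range(len(schedule[0])):
--         shifts = [nurse[day] for nurse in schedule]
--         morning, afternoon, night = shifts.count(1), shifts.count(2), shifts.count(3)
--         # 완화된 범위 설정: 모닝: 3~7명, 애프터눈: 2~6명, 나이트: 1~4명으로 범위 변경
--         if not (3 <= morning <= 7) or not (2 <= afternoon <= 6) or not (1 <= night <= 4):
--             f1 += 1
--
--     # 제약 조건 2: 금지된 패턴 확인 (특정 연속 근무 패턴 금지)
--     for nurse in schedule:
--         # 금지된 연속 근무 패턴 체크 (애프터눈 -> 모닝, 나이트 -> 모닝 등)
--         for day in range(len(nurse) - 1):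
--             if (nurse[day], nurse[day + 1]) in [(2, 1), (3, 1), (3, 2)]:
--                 f2 += 1
--                 break
--         # 3일 연속 나이트 근무 금지
--         for day in range(len(nurse) - 2):
--             if nurse[day] == nurse[day + 1] == nurse[day + 2] == 3:
--                 f2 += 1
--                 break
--
--     # 제약 조건 3: 근무 횟수 조건 (최근 기간 동안 각 근무 유형의 횟수 체크)
--     valid_morning = period // 7 * 2
--     valid_afternoon = period // 7 * 2
--     valid_night = period // 7
--     valid_rest = period - (valid_morning + valid_afternoon + valid_night)
--
--     for nurse in schedule:
--         recent_schedule = nurse[-period:]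
--         morning_count = recent_schedule.count(1)
--         afternoon_count = recent_schedule.count(2)
--         night_count = recent_schedule.count(3)
--         rest_count = recent_schedule.count(0)
--         if not (valid_morning - 1 <= morning_count <= valid_morning + 1 and
--                 valid_afternoon - 1 <= afternoon_count <= valid_afternoon + 1 and
--                 valid_night - 1 <= night_count <= valid_night + 1 and
--                 valid_rest - 1 <= rest_count <= valid_rest + 1):
--             f3 += 1
--
--     # 총 비용 계산 (각 제약 조건 위반 횟수에 가중치를 곱하여 계산)
--     total_cost = f1 * 5 + f2 * 5 + f3 * 1
--     return total_cost
-- ===== SOURCE B (Python) =====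
-- def evaluate_schedule_with_cost(schedule, period=7, fixed_schedule=None):
--     if fixed_schedule is not None:
--         schedule = [fixed + nurse for fixed, nurse in zip(fixed_schedule, schedule)]
--     num_days = len(schedule[0])
--
--     valid_morning = period // 7 * 2
--     valid_afternoon = period // 7 * 2
--     valid_night = period // 7
--     valid_rest = period - (valid_morning + valid_afternoon + valid_night)
--
--     # single pass over the nurses: build a day x shift-type count table and
--     # accumulate the per-nurse penalties f2 and f3 inline
--     day_counts = [[0, 0, 0] for _ in range(num_days)]
--     f2, f3 = 0, 0
--     for nurse in schedule:
--         for c, s in zip(day_counts, nurse):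
--             if 1 <= s <= 3:
--                 c[s - 1] += 1
--         if any((nurse[d], nurse[d + 1]) in ((2, 1), (3, 1), (3, 2))
--                for d in range(len(nurse) - 1)):
--             f2 += 1
--         if any(nurse[d] == nurse[d + 1] == nurse[d + 2] == 3
--                for d in range(len(nurse) - 2)):
--             f2 += 1
--         recent_schedule = nurse[-period:]
--         if not (valid_morning - 1 <= recent_schedule.count(1) <= valid_morning + 1 and
--                 valid_afternoon - 1 <= recent_schedule.count(2) <= valid_afternoon + 1 and
--                 valid_night - 1 <= recent_schedule.count(3) <= valid_night + 1 and
--                 valid_rest - 1 <= recent_schedule.count(0) <= valid_rest + 1):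
--             f3 += 1
--
--     # consume the table: one day-count entry per day gives f1
--     f1 = sum(1 for morning, afternoon, night in day_counts
--              if not (3 <= morning <= 7) or not (2 <= afternoon <= 6) or not (1 <= night <= 4))
--     return f1 * 5 + f2 * 5 + f3 * 1
-- ===== Notes on version B (the rewrite author's own statement) =====
-- stated objective: alternative
-- what changed: A's three separate passes (a per-day pass that rebuilds and counts each day's column of shifts, then two per-nurse pattern scans, then a per-nurse recent-window pass) are replaced by a single pass over the nurses that builds a day-by-shift-type count table via zip while accumulating f2 and f3 inline, with f1 read off the finished table afterwards.
import Mathlib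
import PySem

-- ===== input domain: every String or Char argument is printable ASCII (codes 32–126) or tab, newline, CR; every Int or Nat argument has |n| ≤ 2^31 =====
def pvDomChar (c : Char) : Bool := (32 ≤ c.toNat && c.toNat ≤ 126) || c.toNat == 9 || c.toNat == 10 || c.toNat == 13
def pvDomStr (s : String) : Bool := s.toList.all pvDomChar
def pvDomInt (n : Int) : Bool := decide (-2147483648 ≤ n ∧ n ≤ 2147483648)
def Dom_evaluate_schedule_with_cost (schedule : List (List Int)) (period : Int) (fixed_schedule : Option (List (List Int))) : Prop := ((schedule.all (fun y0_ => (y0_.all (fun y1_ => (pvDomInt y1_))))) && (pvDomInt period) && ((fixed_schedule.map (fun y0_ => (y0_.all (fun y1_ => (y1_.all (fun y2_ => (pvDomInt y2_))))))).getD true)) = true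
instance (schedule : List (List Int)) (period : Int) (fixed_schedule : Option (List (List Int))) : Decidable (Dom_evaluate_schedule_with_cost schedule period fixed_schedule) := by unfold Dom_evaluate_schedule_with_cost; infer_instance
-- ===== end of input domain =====

-- B replaces A's three passes by a single pass over the nurses that maintains a per-day
-- shift-count table (consumed afterwards for f1) and accumulates f2/f3 inline; same cost, different decomposition.

-- ===== PORT A =====
-- "for day in range(len(nurse)-1): if (nurse[day], nurse[day+1]) in [...]: f2 += 1; break"
-- (the break makes the loop a search: ported as .any over the same range)
def pvA_pat (nurse : List Int) : Bool :=
  (PySem.List.pyRange 0 ((nurse.length : Int) - 1) 1).any (fun day =>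
    let x := PySem.List.pyGetD nurse day 0
    let y := PySem.List.pyGetD nurse (day + 1) 0
    (x == 2 && y == 1) || (x == 3 && y == 1) || (x == 3 && y == 2))

-- "for day in range(len(nurse)-2): if nurse[day] == nurse[day+1] == nurse[day+2] == 3: f2 += 1; break"
def pvA_night (nurse : List Int) : Bool :=
  (PySem.List.pyRange 0 ((nurse.length : Int) - 2) 1).any (fun day =>
    PySem.List.pyGetD nurse day 0 == 3 && PySem.List.pyGetD nurse (day + 1) 0 == 3 &&
      PySem.List.pyGetD nurse (day + 2) 0 == 3)

def evaluate_schedule_with_cost (schedule : List (List Int)) (period : Int) (fixed_schedule : Option (List (List Int))) : Int :=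
  let sched := match fixed_schedule with
    | none => schedule
    | some fs => (fs.zip schedule).map (fun (p : List Int × List Int) => p.1 ++ p.2)
  let f1 : Int := (PySem.List.pyRange 0 ((sched.headD []).length : Int) 1).foldl
    (fun f1 day =>
      let shifts := sched.map (fun nurse => PySem.List.pyGetD nurse day 0)
      let morning : Int := shifts.count 1
      let afternoon : Int := shifts.count 2
      let night : Int := shifts.count 3
      if ¬(3 ≤ morning ∧ morning ≤ 7) ∨ ¬(2 ≤ afternoon ∧ afternoon ≤ 6) ∨ ¬(1 ≤ night ∧ night ≤ 4)
      then f1 + 1 else f1) 0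
  let f2 : Int := sched.foldl (fun f2 nurse =>
      let f2 := if pvA_pat nurse then f2 + 1 else f2
      if pvA_night nurse then f2 + 1 else f2) 0
  let valid_morning := PySem.Int.floordiv period 7 * 2
  let valid_afternoon := PySem.Int.floordiv period 7 * 2
  let valid_night := PySem.Int.floordiv period 7
  let valid_rest := period - (valid_morning + valid_afternoon + valid_night)
  let f3 : Int := sched.foldl (fun f3 nurse =>
      let recent := PySem.List.slice nurse (some (-period)) none
      let mc : Int := recent.count 1
      let ac : Int := recent.count 2
      let nc : Int := recent.count 3
      let rc : Int := recent.count 0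
      if ¬(valid_morning - 1 ≤ mc ∧ mc ≤ valid_morning + 1 ∧
           valid_afternoon - 1 ≤ ac ∧ ac ≤ valid_afternoon + 1 ∧
           valid_night - 1 ≤ nc ∧ nc ≤ valid_night + 1 ∧
           valid_rest - 1 ≤ rc ∧ rc ≤ valid_rest + 1)
      then f3 + 1 else f3) 0
  f1 * 5 + f2 * 5 + f3 * 1

-- ===== PORT B =====
-- "if 1 <= s <= 3: c[s-1] += 1"  (the 3-slot day counter as a triple)
def pvBump (c : Int × Int × Int) (s : Int) : Int × Int × Int :=
  if s == 1 then (c.1 + 1, c.2.1, c.2.2)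
  else if s == 2 then (c.1, c.2.1 + 1, c.2.2)
  else if s == 3 then (c.1, c.2.1, c.2.2 + 1)
  else c

def pvB_pat (nurse : List Int) : Bool :=
  (List.range (nurse.length - 1)).any (fun d =>
    let x := nurse.getD d 0
    let y := nurse.getD (d + 1) 0
    (x == 2 && y == 1) || (x == 3 && y == 1) || (x == 3 && y == 2))

def pvB_night (nurse : List Int) : Bool :=
  (List.range (nurse.length - 2)).any (fun d =>
    nurse.getD d 0 == 3 && nurse.getD (d + 1) 0 == 3 && nurse.getD (d + 2) 0 == 3)

def evaluate_schedule_with_cost_alt (schedule : List (List Int)) (period : Int) (fixed_schedule : Option (List (List Int))) : Int :=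
  let sched := match fixed_schedule with
    | none => schedule
    | some fs => (fs.zip schedule).map (fun (p : List Int × List Int) => p.1 ++ p.2)
  let numDays := (sched.headD []).length
  let valid_morning := PySem.Int.floordiv period 7 * 2
  let valid_afternoon := PySem.Int.floordiv period 7 * 2
  let valid_night := PySem.Int.floordiv period 7
  let valid_rest := period - (valid_morning + valid_afternoon + valid_night)
  let st := sched.foldl (fun (st : List (Int × Int × Int) × Int × Int) (nurse : List Int) =>
      -- in-place 'for c, s in zip(day_counts, nurse)': entries past min length are untouched
      let t := List.zipWith pvBump st.1 nurse ++ st.1.drop nurse.length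
      let f2 := if pvB_pat nurse then st.2.1 + 1 else st.2.1
      let f2 := if pvB_night nurse then f2 + 1 else f2
      let recent := PySem.List.slice nurse (some (-period)) none
      let mc : Int := recent.count 1
      let ac : Int := recent.count 2
      let nc : Int := recent.count 3
      let rc : Int := recent.count 0
      let f3 := if ¬(valid_morning - 1 ≤ mc ∧ mc ≤ valid_morning + 1 ∧
           valid_afternoon - 1 ≤ ac ∧ ac ≤ valid_afternoon + 1 ∧
           valid_night - 1 ≤ nc ∧ nc ≤ valid_night + 1 ∧
           valid_rest - 1 ≤ rc ∧ rc ≤ valid_rest + 1)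
        then st.2.2 + 1 else st.2.2
      (t, f2, f3))
    (List.replicate numDays ((0 : Int), (0 : Int), (0 : Int)), (0 : Int), (0 : Int))
  let f1 : Int := (st.1.countP (fun (c : Int × Int × Int) =>
      decide (¬(3 ≤ c.1 ∧ c.1 ≤ 7) ∨ ¬(2 ≤ c.2.1 ∧ c.2.1 ≤ 6) ∨ ¬(1 ≤ c.2.2 ∧ c.2.2 ≤ 4))) : Int)
  f1 * 5 + st.2.1 * 5 + st.2.2 * 1

-- ===== PRECONDITION & SPEC =====
def pvRowsOf (schedule : List (List Int)) (fixed_schedule : Option (List (List Int))) : List (List Int) :=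
  match fixed_schedule with
  | none => schedule
  | some fs => (fs.zip schedule).map (fun (p : List Int × List Int) => p.1 ++ p.2)

-- Pre_ excludes exactly the inputs where A raises IndexError: the (merged) schedule must be
-- nonempty (schedule[0] / fixed_schedule[0]) and no nurse row shorter than the first (nurse[day]).
def Pre_evaluate_schedule_with_cost (schedule : List (List Int)) (period : Int) (fixed_schedule : Option (List (List Int))) : Prop :=
  pvRowsOf schedule fixed_schedule ≠ [] ∧
  ∀ r ∈ pvRowsOf schedule fixed_schedule, ((pvRowsOf schedule fixed_schedule).headD []).length ≤ r.length
instance (schedule : List (List Int)) (period : Int) (fixed_schedule : Option (List (List Int))) : Decidable (Pre_evaluate_schedule_with_cost schedule period fixed_schedule) := by unfold Pre_evaluate_schedule_with_cost; infer_instance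

def pvWitness_evaluate_schedule_with_cost : List (List Int) × Int × Option (List (List Int)) := ([[1], [2], [3]], 7, none)

def Spec_evaluate_schedule_with_cost (schedule : List (List Int)) (period : Int) (fixed_schedule : Option (List (List Int))) (out : Int) : Prop := out = evaluate_schedule_with_cost_alt schedule period fixed_schedule
instance (schedule : List (List Int)) (period : Int) (fixed_schedule : Option (List (List Int))) (out : Int) : Decidable (Spec_evaluate_schedule_with_cost schedule period fixed_schedule out) := by unfold Spec_evaluate_schedule_with_cost; infer_instance

-- ===== CLAIM (what is proved, stated in full; the proofs are below) =====
def Claim_equal_evaluate_schedule_with_cost : Prop := ∀ (schedule : List (List Int)) (period : Int) (fixed_schedule : Option (List (List Int))), Dom_evaluate_schedule_with_cost schedule period fixed_schedule → Pre_evaluate_schedule_with_cost schedule period fixed_schedule → Spec_evaluate_schedule_with_cost schedule period fixed_schedule (evaluate_schedule_with_cost schedule period fixed_schedule)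

-- ===== LEMMAS AND PROOFS =====

theorem pvPat_eq : pvA_pat = pvB_pat := by
  funext nurse
  simp only [pvA_pat, pvB_pat, PySem.List.pyRange_one, List.any_map, sub_zero]
  refine List.any_congr (by rw [show ((nurse.length : Int) - 1).toNat = nurse.length - 1 from by omega]) fun k => ?_
  simp only [Function.comp, zero_add, List.getD_eq_getElem?_getD]
  rw [show (k : Int) + 1 = ((k + 1 : Nat) : Int) from by push_cast; ring]
  simp only [PySem.List.pyGetD_natCast, List.getD_eq_getElem?_getD]

theorem pvNight_eq : pvA_night = pvB_night := by
  funext nurse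
  simp only [pvA_night, pvB_night, PySem.List.pyRange_one, List.any_map, sub_zero]
  refine List.any_congr (by rw [show ((nurse.length : Int) - 2).toNat = nurse.length - 2 from by omega]) fun k => ?_
  simp only [Function.comp, zero_add, List.getD_eq_getElem?_getD]
  rw [show (k : Int) + 1 = ((k + 1 : Nat) : Int) from by push_cast; ring,
      show (k : Int) + 2 = ((k + 2 : Nat) : Int) from by push_cast; ring]
  simp only [PySem.List.pyGetD_natCast, List.getD_eq_getElem?_getD]

-- length of the day-count table is invariant under the nurse pass
theorem pvTable_len (rows : List (List Int)) : ∀ (t : List (Int × Int × Int)),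
    (rows.foldl (fun t nu => List.zipWith pvBump t nu ++ t.drop nu.length) t).length = t.length := by
  induction rows with
  | nil => intro t; rfl
  | cons r rs ih =>
    intro t
    have hlen : (List.zipWith pvBump t r ++ t.drop r.length).length = t.length := by
      simp [List.length_zipWith]; omega
    rw [List.foldl_cons, ih, hlen]

-- entry d of the table folds pvBump over column d
theorem pvTable_getD (rows : List (List Int)) : ∀ (t : List (Int × Int × Int)) (d : Nat),
    d < t.length → (∀ r ∈ rows, t.length ≤ r.length) →
    (rows.foldl (fun t nu => List.zipWith pvBump t nu ++ t.drop nu.length) t).getD d (0, 0, 0)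
      = rows.foldl (fun c nu => pvBump c (nu.getD d 0)) (t.getD d (0, 0, 0)) := by
  induction rows with
  | nil => intro t d _ _; rfl
  | cons r rs ih =>
    intro t d hd h
    have hr : t.length ≤ r.length := h r (by simp)
    have hdrop : t.drop r.length = ([] : List (Int × Int × Int)) := List.drop_eq_nil_of_le hr
    have hlen : (List.zipWith pvBump t r ++ t.drop r.length).length = t.length := by
      simp [List.length_zipWith]; omega
    have hget : (List.zipWith pvBump t r ++ t.drop r.length).getD d (0, 0, 0)
        = pvBump (t.getD d (0, 0, 0)) (r.getD d 0) := by
      rw [hdrop, List.append_nil,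
          List.getD_eq_getElem _ _ (by simp [List.length_zipWith]; omega),
          List.getElem_zipWith,
          List.getD_eq_getElem _ _ hd, List.getD_eq_getElem _ _ (by omega)]
    rw [List.foldl_cons, List.foldl_cons,
        ih _ d (by rw [hlen]; exact hd) (fun x hx => by rw [hlen]; exact h x (by simp [hx])), hget]

-- folding pvBump over column d counts the 1s, 2s and 3s of the column
theorem pvCol (rows : List (List Int)) (d : Nat) : ∀ (c : Int × Int × Int),
    rows.foldl (fun c nu => pvBump c (nu.getD d 0)) c
    = (c.1 + (((rows.map (fun nu => nu.getD d 0)).count 1 : Nat) : Int),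
       c.2.1 + (((rows.map (fun nu => nu.getD d 0)).count 2 : Nat) : Int),
       c.2.2 + (((rows.map (fun nu => nu.getD d 0)).count 3 : Nat) : Int)) := by
  induction rows with
  | nil => intro c; simp
  | cons r rs ih =>
    intro c
    rw [List.foldl_cons, ih]
    simp only [pvBump, List.map_cons, List.count_cons, beq_iff_eq]
    split_ifs with h1 h2 h3 <;>
      simp_all [Prod.ext_iff] <;> omega

-- a single pass with product state splits into the table fold and the two penalty folds
theorem pvSplit (period : Int) (rows : List (List Int)) : ∀ (t : List (Int × Int × Int)) (f2 f3 : Int),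
    rows.foldl (fun (st : List (Int × Int × Int) × Int × Int) (nurse : List Int) =>
      let t := List.zipWith pvBump st.1 nurse ++ st.1.drop nurse.length
      let f2 := if pvB_pat nurse then st.2.1 + 1 else st.2.1
      let f2 := if pvB_night nurse then f2 + 1 else f2
      let recent := PySem.List.slice nurse (some (-period)) none
      let mc : Int := recent.count 1
      let ac : Int := recent.count 2
      let nc : Int := recent.count 3
      let rc : Int := recent.count 0
      let f3 := if ¬(PySem.Int.floordiv period 7 * 2 - 1 ≤ mc ∧ mc ≤ PySem.Int.floordiv period 7 * 2 + 1 ∧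
           PySem.Int.floordiv period 7 * 2 - 1 ≤ ac ∧ ac ≤ PySem.Int.floordiv period 7 * 2 + 1 ∧
           PySem.Int.floordiv period 7 - 1 ≤ nc ∧ nc ≤ PySem.Int.floordiv period 7 + 1 ∧
           period - (PySem.Int.floordiv period 7 * 2 + PySem.Int.floordiv period 7 * 2 + PySem.Int.floordiv period 7) - 1 ≤ rc ∧
           rc ≤ period - (PySem.Int.floordiv period 7 * 2 + PySem.Int.floordiv period 7 * 2 + PySem.Int.floordiv period 7) + 1)
        then st.2.2 + 1 else st.2.2
      (t, f2, f3)) (t, f2, f3)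
    = (rows.foldl (fun t nu => List.zipWith pvBump t nu ++ t.drop nu.length) t,
       rows.foldl (fun f2 nurse =>
         if pvB_night nurse then (if pvB_pat nurse then f2 + 1 else f2) + 1
         else (if pvB_pat nurse then f2 + 1 else f2)) f2,
       rows.foldl (fun f3 nurse =>
         let recent := PySem.List.slice nurse (some (-period)) none
         let mc : Int := recent.count 1
         let ac : Int := recent.count 2
         let nc : Int := recent.count 3
         let rc : Int := recent.count 0
         if ¬(PySem.Int.floordiv period 7 * 2 - 1 ≤ mc ∧ mc ≤ PySem.Int.floordiv period 7 * 2 + 1 ∧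
           PySem.Int.floordiv period 7 * 2 - 1 ≤ ac ∧ ac ≤ PySem.Int.floordiv period 7 * 2 + 1 ∧
           PySem.Int.floordiv period 7 - 1 ≤ nc ∧ nc ≤ PySem.Int.floordiv period 7 + 1 ∧
           period - (PySem.Int.floordiv period 7 * 2 + PySem.Int.floordiv period 7 * 2 + PySem.Int.floordiv period 7) - 1 ≤ rc ∧
           rc ≤ period - (PySem.Int.floordiv period 7 * 2 + PySem.Int.floordiv period 7 * 2 + PySem.Int.floordiv period 7) + 1)
         then f3 + 1 else f3) f3) := by
  induction rows with
  | nil => intro t f2 f3; rfl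
  | cons r rs ih =>
    intro t f2 f3
    rw [List.foldl_cons, List.foldl_cons, List.foldl_cons, List.foldl_cons, ih]

-- A's per-day pass equals the count of violating entries of B's finished table
theorem pvF1 (rows : List (List Int))
    (h : ∀ r ∈ rows, (rows.headD []).length ≤ r.length) :
    (PySem.List.pyRange 0 (((rows.headD []).length : Nat) : Int) 1).foldl
      (fun f1 day =>
        if ¬(3 ≤ (((rows.map (fun nurse => PySem.List.pyGetD nurse day 0)).count 1 : Nat) : Int) ∧
              (((rows.map (fun nurse => PySem.List.pyGetD nurse day 0)).count 1 : Nat) : Int) ≤ 7) ∨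
           ¬(2 ≤ (((rows.map (fun nurse => PySem.List.pyGetD nurse day 0)).count 2 : Nat) : Int) ∧
              (((rows.map (fun nurse => PySem.List.pyGetD nurse day 0)).count 2 : Nat) : Int) ≤ 6) ∨
           ¬(1 ≤ (((rows.map (fun nurse => PySem.List.pyGetD nurse day 0)).count 3 : Nat) : Int) ∧
              (((rows.map (fun nurse => PySem.List.pyGetD nurse day 0)).count 3 : Nat) : Int) ≤ 4)
        then f1 + 1 else f1) 0
    = (((rows.foldl (fun t nu => List.zipWith pvBump t nu ++ t.drop nu.length)
          (List.replicate (rows.headD []).length ((0 : Int), (0 : Int), (0 : Int)))).countP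
        (fun (c : Int × Int × Int) =>
          decide (¬(3 ≤ c.1 ∧ c.1 ≤ 7) ∨ ¬(2 ≤ c.2.1 ∧ c.2.1 ≤ 6) ∨ ¬(1 ≤ c.2.2 ∧ c.2.2 ≤ 4))) : Nat) : Int) := by
  have hT : rows.foldl (fun t nu => List.zipWith pvBump t nu ++ t.drop nu.length)
        (List.replicate (rows.headD []).length ((0 : Int), (0 : Int), (0 : Int)))
      = (List.range (rows.headD []).length).map (fun d =>
          ((0 : Int) + (((rows.map (fun nu => nu.getD d 0)).count 1 : Nat) : Int),
           (0 : Int) + (((rows.map (fun nu => nu.getD d 0)).count 2 : Nat) : Int),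
           (0 : Int) + (((rows.map (fun nu => nu.getD d 0)).count 3 : Nat) : Int))) := by
    apply List.ext_getElem
    · rw [pvTable_len, List.length_replicate, List.length_map, List.length_range]
    · intro i h1 h2
      have hi : i < (rows.headD []).length := by
        have := pvTable_len rows (List.replicate (rows.headD []).length ((0 : Int), (0 : Int), (0 : Int)))
        rw [this, List.length_replicate] at h1; exact h1
      rw [← List.getD_eq_getElem _ ((0 : Int), (0 : Int), (0 : Int)) h1,
          pvTable_getD rows _ i (by rwa [List.length_replicate]) (fun r hr => by rw [List.length_replicate]; exact h r hr),
          List.getD_eq_getElem _ _ (by rwa [List.length_replicate]),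
          List.getElem_replicate, pvCol]
      simp
  rw [hT, List.countP_map]
  rw [PySem.List.pyRange_one, sub_zero, Int.toNat_natCast, List.foldl_map,
      PySem.List.foldl_ite_add_one
        (fun (k : Nat) =>
          ¬(3 ≤ (((rows.map (fun nurse => PySem.List.pyGetD nurse ((0 : Int) + (k : Int)) 0)).count 1 : Nat) : Int) ∧
              (((rows.map (fun nurse => PySem.List.pyGetD nurse ((0 : Int) + (k : Int)) 0)).count 1 : Nat) : Int) ≤ 7) ∨
           ¬(2 ≤ (((rows.map (fun nurse => PySem.List.pyGetD nurse ((0 : Int) + (k : Int)) 0)).count 2 : Nat) : Int) ∧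
              (((rows.map (fun nurse => PySem.List.pyGetD nurse ((0 : Int) + (k : Int)) 0)).count 2 : Nat) : Int) ≤ 6) ∨
           ¬(1 ≤ (((rows.map (fun nurse => PySem.List.pyGetD nurse ((0 : Int) + (k : Int)) 0)).count 3 : Nat) : Int) ∧
              (((rows.map (fun nurse => PySem.List.pyGetD nurse ((0 : Int) + (k : Int)) 0)).count 3 : Nat) : Int) ≤ 4))]
  rw [zero_add]
  congr 1
  apply List.countP_congr
  intro k _
  simp only [Function.comp, zero_add, PySem.List.pyGetD_natCast]

-- ===== VERDICT (by name: the statement is the Claim_ definition above) =====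
theorem evaluate_schedule_with_cost_spec : Claim_equal_evaluate_schedule_with_cost := by
  intro schedule period fixed_schedule _ hpre
  unfold Spec_evaluate_schedule_with_cost
  unfold Pre_evaluate_schedule_with_cost pvRowsOf at hpre
  simp only [evaluate_schedule_with_cost, evaluate_schedule_with_cost_alt]
  revert hpre
  generalize (match fixed_schedule with
    | none => schedule
    | some fs => (fs.zip schedule).map (fun (p : List Int × List Int) => p.1 ++ p.2)) = rows
  intro hpre
  rw [pvSplit, pvPat_eq, pvNight_eq, pvF1 rows hpre.2]
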